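-- pv_equiv track=rewrite | github.com/erjantj/hackerrank | decibinary-numbers.py | dbValue
-- ===== SOURCE A (Python) =====
-- def dbValue(value):
--     power = 0
--     summ = 0
--     while value > 0:
--         digit = value%10
--         value = value//10
--
--         summ += digit*(2**power)
--
--         power += 1
--
--     return summ
-- ===== SOURCE B (Python) =====
-- def dbValue(value):
--     if value <= 0:
--         return 0
--     return 2 * dbValue(value // 10) + value % 10
-- ===== Notes on version B (the rewrite author's own statement) =====
-- stated objective: simpler
-- what changed: Replaces the iterative loop that maintains a power counter and a running sum of digit times the corresponding power of two with a three-line Horner-style recursion on the decimal quotient that keeps no auxiliary state.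
import Mathlib
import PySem

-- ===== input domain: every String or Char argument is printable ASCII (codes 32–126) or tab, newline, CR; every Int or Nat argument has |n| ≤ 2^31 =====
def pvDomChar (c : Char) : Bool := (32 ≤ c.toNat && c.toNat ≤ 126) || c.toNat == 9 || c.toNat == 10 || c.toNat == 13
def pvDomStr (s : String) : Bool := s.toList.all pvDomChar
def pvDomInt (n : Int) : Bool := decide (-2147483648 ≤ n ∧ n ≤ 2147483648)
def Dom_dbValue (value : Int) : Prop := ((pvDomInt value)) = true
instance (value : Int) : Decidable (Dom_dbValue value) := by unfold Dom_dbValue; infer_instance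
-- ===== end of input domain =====

-- B replaces A loop (power counter and running sum of digit times a power of two) with a
-- Horner-style recursion on the decimal quotient keeping no auxiliary state; simpler, same cost.

-- ===== PORT A =====
-- the while loop of A: state (value, power, summ), digit = value % 10, value = value // 10
def dbValueGo (value power summ : Int) : Int :=
  if value > 0 then
    dbValueGo (PySem.Int.floordiv value 10) (power + 1)
      (summ + PySem.Int.mod value 10 * 2 ^ power.toNat)
  else summ
termination_by value.toNat
decreasing_by
  rename_i h
  rw [PySem.Int.floordiv_eq_ediv_of_pos (by omega : (0:Int) < 10)]
  omega

def dbValue (value : Int) : Int := dbValueGo value 0 0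

-- ===== PORT B =====
def dbValue_alt (value : Int) : Int :=
  if value ≤ 0 then 0
  else 2 * dbValue_alt (PySem.Int.floordiv value 10) + PySem.Int.mod value 10
termination_by value.toNat
decreasing_by
  rename_i h
  rw [PySem.Int.floordiv_eq_ediv_of_pos (by omega : (0:Int) < 10)]
  omega

-- ===== PRECONDITION & SPEC =====
def Spec_dbValue (value : Int) (out : Int) : Prop := out = dbValue_alt value
instance (value : Int) (out : Int) : Decidable (Spec_dbValue value out) := by unfold Spec_dbValue; infer_instance

-- ===== CLAIM (what is proved, stated in full; the proofs are below) =====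
def Claim_equal_dbValue : Prop := ∀ (value : Int), Dom_dbValue value → Spec_dbValue value (dbValue value)

-- ===== LEMMAS AND PROOFS =====
theorem dbValueGo_eq (n : Nat) : ∀ v p s : Int, v.toNat ≤ n → 0 ≤ p →
    dbValueGo v p s = s + 2 ^ p.toNat * dbValue_alt v := by
  induction n with
  | zero =>
    intro v p s hv _
    rw [dbValueGo, dbValue_alt]
    rw [if_neg (by omega), if_pos (by omega)]
    ring
  | succ n ih =>
    intro v p s hv hp
    by_cases h : v > 0
    · rw [dbValueGo, dbValue_alt, if_pos h, if_neg (by omega)]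
      rw [ih _ _ _ (by rw [PySem.Int.floordiv_eq_ediv_of_pos (by omega : (0:Int) < 10)]; omega)
            (by omega)]
      have hpt : (p + 1).toNat = p.toNat + 1 := by omega
      rw [hpt]
      ring
    · rw [dbValueGo, dbValue_alt, if_neg h, if_pos (by omega)]
      ring

-- ===== VERDICT (by name: the statement is the Claim_ definition above) =====
theorem dbValue_spec : Claim_equal_dbValue := by
  intro v _
  unfold Spec_dbValue dbValue
  rw [dbValueGo_eq v.toNat v 0 0 le_rfl le_rfl]
  simp
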